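-- pv_equiv track=rewrite | github.com/Elgedr/Python | KT/kt4/exam.py | list_move
-- ===== SOURCE A (Python) =====
-- def list_move(initial_list: list, amount: int, factor: int) -> list:
--     """
--     Create amount lists where elements are shifted right by factor.
--
--     This function creates a list with amount of lists inside it.
--     In each sublist, elements are shifted right by factor elements.
--     factor >= 0
--
--     list_move(["a", "b", "c"], 3, 0) => [['a', 'b', 'c'], ['a', 'b', 'c'], ['a', 'b', 'c']]
--     list_move(["a", "b", "c"], 3, 1) => [['a', 'b', 'c'], ['c', 'a', 'b'], ['b', 'c', 'a']]
--     list_move([1, 2, 3], 3, 2) => [[1, 2, 3], [2, 3, 1], [3, 1, 2]]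
--     list_move([1, 2, 3], 4, 1) => [[1, 2, 3], [3, 1, 2], [2, 3, 1], [1, 2, 3]]
--     list_move([], 3, 4) => [[], [], []]
--     """
--     if amount == 0:
--         return []
--     listt = initial_list
--     counter = amount
--     res = [initial_list]
--     while counter > 1:
--         if not initial_list:
--             res.append([])
--             counter -= 1
--         else:
--             updated = listt[-factor:] + listt[:-factor]
--             res.append(updated)
--             listt = updated
--             counter -= 1
--     return res
-- ===== SOURCE B (Python) =====
-- def list_move(initial_list: list, amount: int, factor: int) -> list:
--     """Each row is computed directly from its index: a single shift moves
--     len(initial_list[-factor:]) elements to the front, so row i is the list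
--     rotated right by i times that amount."""
--     if amount == 0:
--         return []
--     n = len(initial_list)
--     step = len(initial_list[-factor:])
--     return [initial_list] + [
--         initial_list[n - i * step % n:] + initial_list[:n - i * step % n] if n else []
--         for i in range(1, amount)
--     ]
-- ===== Notes on version B (the rewrite author's own statement) =====
-- stated objective: alternative
-- what changed: Each sublist is computed directly from its index as a rotation of the original list (right by i times the per-shift displacement len(initial_list[-factor:])), replacing A's while loop that repeatedly re-slices the previous sublist with a running counter.
import Mathlib
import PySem

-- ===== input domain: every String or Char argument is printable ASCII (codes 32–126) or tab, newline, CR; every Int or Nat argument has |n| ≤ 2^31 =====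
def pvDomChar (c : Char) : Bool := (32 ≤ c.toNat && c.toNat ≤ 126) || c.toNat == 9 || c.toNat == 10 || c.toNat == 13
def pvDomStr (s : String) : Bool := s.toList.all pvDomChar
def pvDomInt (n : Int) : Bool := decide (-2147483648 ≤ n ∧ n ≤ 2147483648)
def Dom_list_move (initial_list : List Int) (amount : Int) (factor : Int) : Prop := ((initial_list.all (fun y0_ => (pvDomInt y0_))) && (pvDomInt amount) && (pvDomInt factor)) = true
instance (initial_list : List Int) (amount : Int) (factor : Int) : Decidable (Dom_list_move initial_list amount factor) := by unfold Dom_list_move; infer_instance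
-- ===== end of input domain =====

-- B computes each sublist directly from its index as a rotation of the original list,
-- instead of A's while loop that repeatedly re-slices the previous sublist (objective: alternative).

-- ===== PORT A =====
-- the while loop of A: state (listt, counter, res); decreases counter.toNat
def list_move_loop (initial_list : List Int) (factor : Int)
    (listt : List Int) (counter : Int) (res : List (List Int)) : List (List Int) :=
  if h : counter > 1 then
    if initial_list = [] then
      list_move_loop initial_list factor listt (counter - 1) (res ++ [[]])
    else
      let updated := PySem.List.slice listt (some (-factor)) none ++
                     PySem.List.slice listt none (some (-factor))
      list_move_loop initial_list factor updated (counter - 1) (res ++ [updated])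
  else res
termination_by counter.toNat
decreasing_by all_goals omega

def list_move (initial_list : List Int) (amount : Int) (factor : Int) : List (List Int) :=
  if amount = 0 then []
  else list_move_loop initial_list factor initial_list amount [initial_list]

-- ===== PORT B =====
def list_move_alt (initial_list : List Int) (amount : Int) (factor : Int) : List (List Int) :=
  if amount = 0 then []
  else
    let n : Int := initial_list.length
    let step : Int := (PySem.List.slice initial_list (some (-factor)) none).length
    [initial_list] ++
      (PySem.List.pyRange 1 amount 1).map (fun i =>
        if n ≠ 0 then
          PySem.List.slice initial_list
            (some (n - PySem.Int.mod (i * step) n)) none ++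
          PySem.List.slice initial_list none
            (some (n - PySem.Int.mod (i * step) n))
        else [])

-- ===== PRECONDITION & SPEC =====
def Spec_list_move (initial_list : List Int) (amount : Int) (factor : Int) (out : List (List Int)) : Prop := out = list_move_alt initial_list amount factor
instance (initial_list : List Int) (amount : Int) (factor : Int) (out : List (List Int)) : Decidable (Spec_list_move initial_list amount factor out) := by unfold Spec_list_move; infer_instance

-- ===== CLAIM (what is proved, stated in full; the proofs are below) =====
def Claim_equal_list_move : Prop := ∀ (initial_list : List Int) (amount : Int) (factor : Int), Dom_list_move initial_list amount factor → Spec_list_move initial_list amount factor (list_move initial_list amount factor)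

-- ===== LEMMAS AND PROOFS =====

-- the effective left-rotation amount of one step of A's loop on a list of length n
def stepK (f : Int) (n : Nat) : Nat :=
  if 0 < |f| ∧ |f| < (n : Int) then ((-f) % (n : Int)).toNat else 0

-- one A-step (listt[-factor:] + listt[:-factor]) is a left rotation by stepK
theorem step_eq_rotate (f : Int) (l : List Int) :
    PySem.List.slice l (some (-f)) none ++ PySem.List.slice l none (some (-f)) =
      l.rotate (stepK f l.length) := by
  rcases lt_trichotomy f 0 with hf | hf | hf
  · -- f < 0 : -f > 0
    have hm : (0:Int) ≤ -f := by omega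
    rw [PySem.List.slice_from l hm, PySem.List.slice_to l hm]
    by_cases hlt : (-f).toNat < l.length
    · have hcond : 0 < |f| ∧ |f| < (l.length : Int) := by
        have habs : |f| = -f := abs_of_neg hf
        constructor <;> omega
      have hmod : (-f) % (l.length : Int) = -f := by
        refine Int.emod_eq_of_lt hm ?_
        omega
      rw [stepK, if_pos hcond, hmod,
        List.rotate_eq_drop_append_take (by omega : (-f).toNat ≤ l.length)]
    · have hcond : ¬ (0 < |f| ∧ |f| < (l.length : Int)) := by
        rw [abs_of_neg hf]; omega
      rw [stepK, if_neg hcond, List.rotate_zero,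
        List.drop_eq_nil_of_le (by omega), List.take_of_length_le (by omega),
        List.nil_append]
  · -- f = 0
    subst hf
    have hcond : ¬ (0 < |(0:Int)| ∧ |(0:Int)| < (l.length : Int)) := by simp
    rw [stepK, if_neg hcond, List.rotate_zero]
    norm_num [PySem.List.slice_from l (le_refl (0:Int)), PySem.List.slice_to l (le_refl (0:Int))]
  · -- f > 0 : -f < 0
    by_cases hlt : f.toNat < l.length
    · have h1 : -f = -(f.toNat : Int) := by omega
      rw [h1, PySem.List.slice_from_neg_natCast l f.toNat (by omega),
        PySem.List.slice_to_neg_natCast l f.toNat (by omega)]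
      have hcond : 0 < |f| ∧ |f| < (l.length : Int) := by
        rw [abs_of_pos hf]; omega
      have hmod : (-f) % (l.length : Int) = (l.length : Int) - f := by
        have h2 : -f = ((l.length : Int) - f) + (l.length : Int) * (-1) := by ring
        rw [h2, Int.add_mul_emod_self_left]
        exact Int.emod_eq_of_lt (by omega) (by omega)
      have h3 : ((((l.length : Int) - f)).toNat) = l.length - f.toNat := by omega
      rw [stepK, if_pos hcond, hmod, h3,
        List.rotate_eq_drop_append_take (by omega : l.length - f.toNat ≤ l.length)]
    · have h1 : -f = -(f.toNat : Int) := by omega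
      have hcond : ¬ (0 < |f| ∧ |f| < (l.length : Int)) := by
        rw [abs_of_pos hf]; omega
      rw [h1, PySem.List.slice_to_neg_natCast l f.toNat (by omega),
        PySem.List.slice_some_none l (-(f.toNat:Int)), PySem.List.clampIdx_neg_natCast l.length f.toNat (by omega),
        stepK, if_neg hcond, List.rotate_zero]
      have h4 : l.length - f.toNat = 0 := by omega
      rw [h4, List.drop_zero, List.take_zero, List.append_nil]

-- A's while loop appends successive rotations of listt
theorem loop_spec (init : List Int) (f : Int) :
    ∀ (c : Nat) (counter : Int) (listt : List Int) (res : List (List Int)),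
      counter.toNat = c → (init = [] → listt = []) →
      list_move_loop init f listt counter res =
        res ++ (List.range (c - 1)).map
          (fun j => listt.rotate ((j + 1) * stepK f listt.length)) := by
  intro c
  induction c using Nat.strong_induction_on with
  | _ c ih =>
    intro counter listt res hc hnil
    by_cases hgt : counter > 1
    · have hc2 : 2 ≤ c := by omega
      rw [list_move_loop]
      simp only [hgt, dite_true]
      by_cases he : init = []
      · have hl : listt = [] := hnil he
        rw [if_pos he, ih (c-1) (by omega) _ _ _ (by omega) hnil]
        subst hl
        have : ∀ j : Nat, ([] : List Int).rotate ((j + 1) * stepK f ([]:List Int).length) = [] := by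
          simp
        simp only [this]
        have hr : c - 1 = (c - 2) + 1 := by omega
        rw [hr, List.range_succ_eq_map]
        simp [List.append_assoc, Function.comp_def, List.map_const']
      · rw [if_neg he, ih (c-1) (by omega) _ _ _ (by omega) (fun h => absurd h he)]
        rw [step_eq_rotate f listt]
        have hlen : (listt.rotate (stepK f listt.length)).length = listt.length :=
          listt.length_rotate _
        have hrr : ∀ j : Nat,
            (listt.rotate (stepK f listt.length)).rotate ((j + 1) * stepK f listt.length) =
              listt.rotate ((j + 1 + 1) * stepK f listt.length) := by
          intro j
          rw [listt.rotate_rotate]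
          congr 1
          ring
        simp only [hlen, hrr]
        have hr : c - 1 = (c - 2) + 1 := by omega
        rw [hr, List.range_succ_eq_map]
        simp only [List.map_cons, List.map_map, Function.comp_def, Nat.succ_eq_add_one,
          zero_add, one_mul, List.append_assoc, List.cons_append, Nat.add_sub_cancel, List.nil_append]
    · rw [list_move_loop]
      simp only [hgt, dite_false]
      have : c - 1 = 0 := by omega
      rw [this]
      simp

-- the per-step rightward displacement B reads off: len(initial_list[-factor:])
theorem sLen_eq (f : Int) (l : List Int) :
    (PySem.List.slice l (some (-f)) none).length =
      if 0 < f then min f.toNat l.length else l.length - min (-f).toNat l.length := by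
  by_cases hf : 0 < f
  · rw [if_pos hf]
    have h1 : -f = -(f.toNat : Int) := by omega
    rw [h1, PySem.List.slice_some_none, PySem.List.clampIdx_neg_natCast l.length f.toNat (by omega),
      List.length_drop]
    omega
  · rw [if_neg hf]
    have h1 : -f = ((-f).toNat : Int) := by omega
    rw [h1, PySem.List.slice_some_none, PySem.List.clampIdx_natCast, List.length_drop]
    have h2 : ((((-f).toNat : Int)).toNat) = (-f).toNat := by omega
    rw [h2]

-- stepK is congruent (mod n) to the negation of B's displacement
theorem stepK_cong (f : Int) (l : List Int) (hn : l.length ≠ 0) :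
    ((stepK f l.length : Nat) : Int) % (l.length : Int) =
      ((l.length : Int) - ((PySem.List.slice l (some (-f)) none).length : Int)) % (l.length : Int) := by
  have hn' : (0:Int) < (l.length : Int) := by omega
  have habs : |f| = if 0 ≤ f then f else -f := by
    split_ifs with h
    · exact abs_of_nonneg h
    · exact abs_of_neg (by omega)
  rw [sLen_eq]
  by_cases hc : 0 < |f| ∧ |f| < (l.length : Int)
  · obtain ⟨hc1, hc2⟩ := hc
    rw [stepK, if_pos ⟨hc1, hc2⟩]
    have hK : (((((-f) % (l.length : Int)).toNat) : Nat) : Int) = (-f) % (l.length : Int) :=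
      Int.toNat_of_nonneg (Int.emod_nonneg _ (by omega))
    rw [hK]
    by_cases hf : 0 < f
    · rw [if_pos hf]
      have hmin : min f.toNat l.length = f.toNat := by
        simp only [habs] at hc1 hc2; omega
      rw [hmin]
      have h2 : ((l.length : Int) - (f.toNat : Int)) = -f + (l.length : Int) * 1 := by omega
      rw [h2, Int.add_mul_emod_self_left, Int.emod_emod_of_dvd _ dvd_rfl]
    · rw [if_neg hf]
      have hmin : min (-f).toNat l.length = (-f).toNat := by
        simp only [habs] at hc1 hc2; omega
      rw [hmin]
      have h2 : ((l.length : Int) - ((l.length - (-f).toNat : Nat) : Int)) = -f := by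
        simp only [habs] at hc1 hc2; omega
      rw [h2, Int.emod_emod_of_dvd _ dvd_rfl]
  · rw [stepK, if_neg hc]
    simp only [habs, not_and, not_lt] at hc
    by_cases hf : 0 < f
    · rw [if_pos hf]
      have hmin : min f.toNat l.length = l.length := by
        have := hc (by split_ifs <;> omega)
        split_ifs at this <;> omega
      rw [hmin]
      simp
    · rw [if_neg hf]
      by_cases hf0 : f = 0
      · subst hf0; simp
      · have hge : l.length ≤ (-f).toNat := by
          have := hc (by split_ifs <;> omega)
          split_ifs at this <;> omega
        have hmin2 : min (-f).toNat l.length = l.length := by omega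
        rw [hmin2]
        simp


-- elementwise: the (j+1)-st rotation equals B's closed-form element
theorem element_eq (init : List Int) (f : Int) (j : Nat) :
    init.rotate ((j + 1) * stepK f init.length) =
      (fun i : Int =>
        if ((init.length : Int)) ≠ 0 then
          PySem.List.slice init
            (some ((init.length : Int) -
              PySem.Int.mod (i * ((PySem.List.slice init (some (-f)) none).length : Int))
                (init.length : Int))) none ++
          PySem.List.slice init none
            (some ((init.length : Int) -
              PySem.Int.mod (i * ((PySem.List.slice init (some (-f)) none).length : Int))
                (init.length : Int)))
        else []) (1 + (j : Int)) := by
  by_cases hn : init.length = 0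
  · have : init = [] := List.length_eq_zero_iff.mp hn
    subst this
    simp
  · have hn' : (0:Int) < (init.length : Int) := by omega
    simp only [ne_eq, Nat.cast_eq_zero, hn, not_false_eq_true, if_true]
    set n : Int := (init.length : Int) with hnd
    set s : Int := ((PySem.List.slice init (some (-f)) none).length : Int) with hs
    set m : Int := n - PySem.Int.mod ((1 + (j:Int)) * s) n with hm
    have hmemod : m = n - ((1 + (j:Int)) * s) % n := by
      rw [hm, PySem.Int.mod_eq_emod_of_pos hn']
    have hb1 : 0 ≤ ((1 + (j:Int)) * s) % n := Int.emod_nonneg _ (by omega)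
    have hb2 : ((1 + (j:Int)) * s) % n < n := Int.emod_lt_of_pos _ hn'
    have hm0 : 0 ≤ m := by omega
    have hmle : m.toNat ≤ init.length := by omega
    rw [PySem.List.slice_from init hm0, PySem.List.slice_to init hm0,
      ← List.rotate_eq_drop_append_take hmle,
      ← List.rotate_mod init ((j + 1) * stepK f init.length),
      ← List.rotate_mod init m.toNat]
    congr 1
    have key : ((((j + 1) * stepK f init.length) % init.length : Nat) : Int) =
        ((m.toNat % init.length : Nat) : Int) := by
      push_cast
      rw [Int.toNat_of_nonneg hm0]
      rw [Int.mul_emod, stepK_cong f init hn, ← Int.mul_emod]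
      have h4 : ((j:Int) + 1) * (n - s) = (n - (1 + (j:Int)) * s) + n * (j:Int) := by ring
      rw [h4, Int.add_mul_emod_self_left, hmemod]
      conv_lhs => rw [Int.sub_emod]
      conv_rhs => rw [Int.sub_emod, Int.emod_emod_of_dvd _ dvd_rfl]
    omega


-- ===== VERDICT (by name: the statement is the Claim_ definition above) =====
theorem list_move_spec : Claim_equal_list_move := by
  intro init amount f _
  unfold Spec_list_move list_move list_move_alt
  by_cases ha : amount = 0
  · simp [ha]
  · simp only [ha, if_false]
    rw [loop_spec init f amount.toNat amount init [init] rfl (fun h => h)]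
    rw [PySem.List.pyRange_one 1 amount]
    have hlen : (amount - 1).toNat = amount.toNat - 1 := by omega
    rw [hlen, List.map_map]
    congr 1
    apply List.map_congr_left
    intro j _
    exact element_eq init f j
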